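-- pv_equiv track=rewrite | github.com/lpyil/wordleSolver | gui.py | suggest_words
-- ===== SOURCE A (Python) =====
-- def suggest_words(common_words, word_length):
--     """Harf sıklığını analiz ederek önerilen kelimeleri döndürür."""
--     # Harf sıklığını pozisyon bazında hesapla
--     position_frequency = [{} for _ in range(word_length)]
--     for word in common_words:
--         for i, letter in enumerate(word):
--             if letter not in position_frequency[i]:
--                 position_frequency[i][letter] = 0
--             position_frequency[i][letter] += 1
--
--     # En sık kullanılan harfleri pozisyon bazında bul
--     most_frequent_letters = []
--     for freq in position_frequency:
--         if freq:
--             most_frequent_letters.append(max(freq, key=freq.get))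
--         else:
--             most_frequent_letters.append(None)
--
--     # Önerilen kelimeleri seç
--     suggested_words = []
--     for word in common_words:
--         match_score = sum(1 for i, letter in enumerate(word) if letter == most_frequent_letters[i])
--         suggested_words.append((match_score, word))
--
--     # Skora göre sırala ve en iyi 3 kelimeyi döndür
--     suggested_words.sort(reverse=True, key=lambda x: x[0])
--     return [word for _, word in suggested_words[:3]]
-- ===== SOURCE B (Python) =====
-- def suggest_words(common_words, word_length):
--     """Harf sıklığını analiz ederek önerilen kelimeleri döndürür."""
--     # Most frequent letter per position, counted position by position.
--     # Positions at or beyond the longest word present can never score a point.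
--     maxlen = 0
--     for w in common_words:
--         if len(w) > maxlen:
--             maxlen = len(w)
--     most = []
--     for i in range(min(word_length, maxlen)):
--         counts = {}
--         for w in common_words:
--             if i < len(w):
--                 counts[w[i]] = counts.get(w[i], 0) + 1
--         best = None
--         best_count = 0
--         for letter, c in counts.items():
--             if best_count < c:
--                 best, best_count = letter, c
--         most.append(best)
--
--     # Counting-sort-style selection: bucket words by score, read high to low.
--     buckets = [[] for _ in range(word_length + 1)]
--     for w in common_words:
--         score = sum(1 for i, ch in enumerate(w) if most[i] == ch)
--         buckets[score].append(w)
--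
--     result = []
--     for s in range(word_length, -1, -1):
--         result.extend(buckets[s])
--     return result[:3]
-- ===== Notes on version B (the rewrite author's own statement) =====
-- stated objective: alternative
-- what changed: B computes the most-frequent letter per position directly (one counter dict per position, only up to min(word_length, longest word), with a running best instead of max(freq, key=freq.get)) and selects the top 3 words by counting-sort buckets read from highest score down instead of a stable comparison sort.
-- outside the precondition, e.g. on suggest_words([''], -2): A returns [''], B raises IndexError
import Mathlib
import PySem

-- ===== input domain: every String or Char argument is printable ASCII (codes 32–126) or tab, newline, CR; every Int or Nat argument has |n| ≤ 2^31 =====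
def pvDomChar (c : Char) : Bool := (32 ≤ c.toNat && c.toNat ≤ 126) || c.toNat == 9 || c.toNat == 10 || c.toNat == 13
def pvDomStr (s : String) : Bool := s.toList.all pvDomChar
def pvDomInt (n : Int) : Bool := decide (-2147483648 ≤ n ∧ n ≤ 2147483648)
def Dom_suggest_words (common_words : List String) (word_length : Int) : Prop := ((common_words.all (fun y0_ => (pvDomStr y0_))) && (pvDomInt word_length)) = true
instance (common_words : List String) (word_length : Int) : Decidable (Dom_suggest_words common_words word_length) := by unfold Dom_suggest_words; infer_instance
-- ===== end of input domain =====

-- B buckets words by positional-frequency score (counting-sort selection over positions of the words actually present) instead of A's word_length-wide dict list plus comparison sort; alternative decomposition, same results.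


-- ===== PORT A =====
-- position_frequency[i][letter]-update: 'if letter not in d: d[letter]=0; d[letter] += 1'
def pvStepA (d : PySem.Dict Char Int) (c : Char) : PySem.Dict Char Int :=
  let d := if d.contains c then d else d.insert c 0
  d.insert c (d.getD c 0 + 1)

-- the inner 'for i, letter in enumerate(word)' loop (index into position_frequency;
-- out-of-range i raises IndexError in Python and is excluded by Pre_; the modify is a no-op there)
def pvProcessWordA (pf : List (PySem.Dict Char Int)) (word : String) : List (PySem.Dict Char Int) :=
  (PySem.List.enumerate word.toList).foldl
    (fun pf p => pf.modify p.1.toNat (fun d => pvStepA d p.2)) pf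

-- 'if freq: max(freq, key=freq.get) else None'
def pvEntryA (freq : PySem.Dict Char Int) : Option Char :=
  if freq.keys = [] then none
  else PySem.List.max? freq.keys (fun k => freq.getD k 0)

-- shared scoring comprehension, identical in both Python sources:
-- sum(1 for i, letter in enumerate(word) if letter == most[i])  (most[i] in range under Pre_ / by construction)
def pvScore (most : List (Option Char)) (word : String) : Int :=
  ((PySem.List.enumerate word.toList).map
    (fun p => if PySem.List.pyGetD most p.1 none = some p.2 then (1 : Int) else 0)).sum

def suggest_words (common_words : List String) (word_length : Int) : List String :=
  let position_frequency : List (PySem.Dict Char Int) :=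
    common_words.foldl pvProcessWordA
      ((PySem.List.pyRange 0 word_length 1).map (fun _ => PySem.Dict.empty))
  let most_frequent_letters : List (Option Char) := position_frequency.map pvEntryA
  let suggested_words : List (Int × String) :=
    common_words.map (fun word => (pvScore most_frequent_letters word, word))
  (PySem.List.slice (PySem.List.sorted suggested_words (fun x => x.1) true) none (some 3)).map
    (fun x => x.2)

-- ===== PORT B =====
-- running maximum of word lengths
def pvMaxlenB (common_words : List String) : Int :=
  common_words.foldl (fun m w => if m < PySem.Str.len w then PySem.Str.len w else m) 0

-- counts = {} ; for w: if i < len(w): counts[w[i]] = counts.get(w[i], 0) + 1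
-- (the none arm of the match is unreachable: 0 ≤ i < len w whenever the branch is taken)
def pvCountsB (common_words : List String) (i : Int) : PySem.Dict Char Int :=
  common_words.foldl
    (fun counts w =>
      if i < PySem.Str.len w then
        match PySem.Str.pyGet? w i with
        | some ch => counts.insert ch (counts.getD ch 0 + 1)
        | none => counts
      else counts)
    PySem.Dict.empty

-- best = None; best_count = 0; for letter, c in counts.items(): if best_count < c: best, best_count = letter, c
def pvBestB (common_words : List String) (i : Int) : Option Char :=
  ((pvCountsB common_words i).items.foldl
    (fun bc p => if bc.2 < p.2 then (some p.1, p.2) else bc)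
    ((none : Option Char), (0 : Int))).1

-- most = []; for i in range(word_length): ... most.append(best)
def pvMostB (common_words : List String) (word_length : Int) : List (Option Char) :=
  (PySem.List.pyRange 0 word_length 1).foldl
    (fun most i => most ++ [pvBestB common_words i]) []

def suggest_words_alt (common_words : List String) (word_length : Int) : List String :=
  let maxlen := pvMaxlenB common_words
  let most := pvMostB common_words (min word_length maxlen)
  -- most[i] / buckets[score] raise IndexError in Python only outside Pre_; pvScore's pyGetD
  -- default and the modify no-op are never reached inside Pre_
  let buckets : List (List String) :=
    common_words.foldl
      (fun buckets w => buckets.modify (pvScore most w).toNat (fun b => b ++ [w]))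
      ((PySem.List.pyRange 0 (word_length + 1) 1).map (fun _ => []))
  let result :=
    (PySem.List.pyRange word_length (-1) (-1)).foldl
      (fun res s => res ++ PySem.List.pyGetD buckets s []) []
  PySem.List.slice result none (some 3)

-- ===== PRECONDITION & SPEC =====
-- Pre_ excludes the inputs where A raises IndexError (a word longer than word_length); with a negative
-- word_length and only empty words A happens to return them, but B's natural bucket list is empty there
-- and B itself raises IndexError, so those degenerate inputs are excluded too (cited in claim.json).
def Pre_suggest_words (common_words : List String) (word_length : Int) : Prop :=
  ∀ w ∈ common_words, PySem.Str.len w ≤ word_length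
instance (common_words : List String) (word_length : Int) : Decidable (Pre_suggest_words common_words word_length) := by unfold Pre_suggest_words; infer_instance
def pvWitness_suggest_words : List String × Int := (["hat", "cat", "dog"], 3)

def Spec_suggest_words (common_words : List String) (word_length : Int) (out : List String) : Prop := out = suggest_words_alt common_words word_length
instance (common_words : List String) (word_length : Int) (out : List String) : Decidable (Spec_suggest_words common_words word_length out) := by unfold Spec_suggest_words; infer_instance

-- ===== CLAIM (what is proved, stated in full; the proofs are below) =====
def Claim_equal_suggest_words : Prop := ∀ (common_words : List String) (word_length : Int), Dom_suggest_words common_words word_length → Pre_suggest_words common_words word_length → Spec_suggest_words common_words word_length (suggest_words common_words word_length)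
-- ===== LEMMAS AND PROOFS =====

-- letters found at position i, in word order (= insertion order of A's position_frequency[i])
def pvLetters (cw : List String) (i : Nat) : List Char := cw.filterMap (fun w => w.toList[i]?)

-- the common value of A's most_frequent_letters[i] and B's most[i]
def pvBestSpec (cw : List String) (i : Nat) : Option Char :=
  PySem.List.max? (PySem.Set.ofList (pvLetters cw i)) (fun k => ((pvLetters cw i).count k : Int))

def pvCStep (d : PySem.Dict Char Int) (c : Char) : PySem.Dict Char Int :=
  d.insert c (d.getD c 0 + 1)

def pvStepOpt (d : PySem.Dict Char Int) (o : Option Char) : PySem.Dict Char Int :=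
  match o with
  | none => d
  | some c => pvCStep d c

theorem pvStepA_eq_cstep (d : PySem.Dict Char Int) (c : Char) : pvStepA d c = pvCStep d c := by
  unfold pvStepA pvCStep
  by_cases h : d.contains c = true
  · simp [h]
  · have hb : d.contains c = false := by simpa using h
    have hg : d.get? c = none := by
      have h2 := (PySem.Dict.contains_eq_isSome_get? d c)
      rw [hb] at h2
      exact Option.not_isSome_iff_eq_none.mp (by simp [← h2])
    simp [hb, PySem.Dict.getD, hg, PySem.Dict.insert_insert_self]

theorem pvProcessWordA_inner (l : List Char) (s : Nat) (pf : List (PySem.Dict Char Int)) (i : Nat) :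
    ((PySem.List.enumerate l (s : Int)).foldl
        (fun pf p => pf.modify p.1.toNat (fun d => pvCStep d p.2)) pf)[i]? =
      pf[i]?.map (fun d => pvStepOpt d (if s ≤ i then l[i - s]? else none)) := by
  induction l generalizing s pf with
  | nil =>
    simp [PySem.List.enumerate, pvStepOpt]
  | cons c t ih =>
    rw [PySem.List.enumerate_cons]
    have hc : ((s : Int) + 1) = ((s + 1 : Nat) : Int) := by push_cast; ring
    simp only [List.foldl_cons, hc, Int.toNat_natCast]
    rw [ih (s + 1) (pf.modify s (fun d => pvCStep d c))]
    cases hpf : pf[i]? with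
    | none => simp [List.getElem?_modify, hpf]
    | some d =>
      simp only [List.getElem?_modify, hpf, Option.map_some]
      by_cases hsi : s = i
      · subst hsi
        simp [pvStepOpt, show ¬ (s + 1 ≤ s) by omega]
      · by_cases hle : s ≤ i
        · have h1 : s + 1 ≤ i := by omega
          have h2 : (c :: t)[i - s]? = t[i - s - 1]? := by
            have h3 : i - s = (i - s - 1) + 1 := by omega
            rw [h3]; simp
          have h4 : i - (s + 1) = i - s - 1 := by omega
          simp [hsi, hle, h1, h2, h4]
        · have h5 : ¬ (s + 1 ≤ i) := by omega
          simp [hsi, hle, h5]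

theorem pvProcessWordA_getElem (pf : List (PySem.Dict Char Int)) (w : String) (i : Nat) :
    (pvProcessWordA pf w)[i]? = pf[i]?.map (fun d => pvStepOpt d w.toList[i]?) := by
  unfold pvProcessWordA
  simp only [pvStepA_eq_cstep]
  have h0 : ((0 : Nat) : Int) = (0 : Int) := rfl
  rw [← h0, pvProcessWordA_inner]
  simp

theorem pvPosFreq_getElem (cw : List String) (pf : List (PySem.Dict Char Int)) (i : Nat) :
    (cw.foldl pvProcessWordA pf)[i]? =
      pf[i]?.map (fun d => (pvLetters cw i).foldl pvCStep d) := by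
  induction cw generalizing pf with
  | nil => simp [pvLetters]
  | cons w cw ih =>
    simp only [List.foldl_cons]
    rw [ih, pvProcessWordA_getElem, Option.map_map]
    simp only [pvLetters, List.filterMap_cons]
    cases hw : w.toList[i]? with
    | none => simp [pvStepOpt, Function.comp_def]
    | some c => simp [pvStepOpt, Function.comp_def]

theorem pvMax?_congr_aux {α κ : Type} [LT κ] [DecidableLT κ] (xs : List α) (k1 k2 : α → κ)
    (acc : Option α) (h : ∀ x ∈ xs, k1 x = k2 x) (ha : ∀ m, acc = some m → k1 m = k2 m) :
    xs.foldl (fun acc x => match acc with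
      | none => some x
      | some m => if k1 m < k1 x then some x else some m) acc =
    xs.foldl (fun acc x => match acc with
      | none => some x
      | some m => if k2 m < k2 x then some x else some m) acc := by
  induction xs generalizing acc with
  | nil => rfl
  | cons x xs ih =>
    simp only [List.foldl_cons]
    cases acc with
    | none =>
      exact ih (some x) (fun y hy => h y (by simp [hy])) (fun m hm => by cases hm; exact h x (by simp))
    | some m =>
      dsimp only
      rw [ha m rfl, h x (by simp)]
      split_ifs with hlt
      · exact ih (some x) (fun y hy => h y (by simp [hy])) (fun m' hm' => by cases hm'; exact h x (by simp))
      · exact ih (some m) (fun y hy => h y (by simp [hy])) (fun m' hm' => by cases hm'; exact ha m rfl)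

theorem pvMax?_congr {α κ : Type} [LT κ] [DecidableLT κ] (xs : List α) (k1 k2 : α → κ)
    (h : ∀ x ∈ xs, k1 x = k2 x) : PySem.List.max? xs k1 = PySem.List.max? xs k2 := by
  unfold PySem.List.max?
  exact pvMax?_congr_aux xs k1 k2 none h (by simp)

theorem pvMax?_map_aux {α β κ : Type} [LT κ] [DecidableLT κ] (l : List α) (f : α → β) (key : β → κ)
    (acc : Option α) :
    l.foldl (fun acc x => match acc with
      | none => some (f x)
      | some m => if key m < key (f x) then some (f x) else some m) (acc.map f) =
    (l.foldl (fun acc x => match acc with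
      | none => some x
      | some m => if key (f m) < key (f x) then some x else some m) acc).map f := by
  induction l generalizing acc with
  | nil => rfl
  | cons x xs ih =>
    simp only [List.foldl_cons]
    cases acc with
    | none => simpa using ih (some x)
    | some m =>
      simp only [Option.map_some]
      by_cases hlt : key (f m) < key (f x)
      · simp only [if_pos hlt]
        simpa using ih (some x)
      · simp only [if_neg hlt]
        simpa using ih (some m)

theorem pvMax?_map {α β κ : Type} [LT κ] [DecidableLT κ] (l : List α) (f : α → β) (key : β → κ) :
    PySem.List.max? (l.map f) key = (PySem.List.max? l (fun x => key (f x))).map f := by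
  unfold PySem.List.max?
  rw [List.foldl_map]
  exact pvMax?_map_aux l f key none

theorem pvEntryA_counter (ls : List Char) :
    pvEntryA (PySem.Dict.counter ls) =
      PySem.List.max? (PySem.Set.ofList ls) (fun k => ((ls.count k : Int))) := by
  unfold pvEntryA
  rw [PySem.Dict.keys_counter]
  by_cases hk : PySem.Set.ofList ls = []
  · rw [if_pos hk, hk]
    rfl
  · rw [if_neg hk]
    exact pvMax?_congr _ _ _ (fun k _ => PySem.Dict.getD_counter ls k)

theorem pvCountsB_aux (cw : List String) (j : Nat) (d : PySem.Dict Char Int) :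
    cw.foldl
      (fun counts w =>
        if (j : Int) < PySem.Str.len w then
          match PySem.Str.pyGet? w (j : Int) with
          | some ch => counts.insert ch (counts.getD ch 0 + 1)
          | none => counts
        else counts) d =
    (pvLetters cw j).foldl (fun d c => d.insert c (d.getD c 0 + 1)) d := by
  induction cw generalizing d with
  | nil => rfl
  | cons w cw ih =>
    simp only [List.foldl_cons, pvLetters, List.filterMap_cons]
    by_cases hj : j < w.toList.length
    · have hlen : (j : Int) < PySem.Str.len w := by
        simp only [PySem.Str.len]
        exact_mod_cast hj
      obtain ⟨c, hc⟩ : ∃ c, w.toList[j]? = some c := ⟨w.toList[j], by simp⟩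
      rw [if_pos hlen, PySem.Str.pyGet?_natCast, hc]
      simpa [pvLetters] using ih (d.insert c (d.getD c 0 + 1))
    · have hlen : ¬ ((j : Int) < PySem.Str.len w) := by
        simp only [PySem.Str.len]
        exact_mod_cast hj
      have hc : w.toList[j]? = none := List.getElem?_eq_none (by omega)
      rw [if_neg hlen, hc]
      simpa [pvLetters, hc] using ih d

theorem pvCountsB_eq_counter (cw : List String) (j : Nat) :
    pvCountsB cw (j : Int) = PySem.Dict.counter (pvLetters cw j) := by
  unfold pvCountsB
  rw [pvCountsB_aux]
  exact PySem.Dict.foldl_insert_getD_add_one_eq_counter (pvLetters cw j)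

-- Python's 'best/best_count' loop, related to max? through the encoding (none,0)/(some k,c)
def pvMStep (acc : Option (Char × Int)) (x : Char × Int) : Option (Char × Int) :=
  match acc with
  | none => some x
  | some m => if m.2 < x.2 then some x else some m

theorem pvFoldl_mstep (l : List (Char × Int)) :
    l.foldl pvMStep none = PySem.List.max? l (fun y => y.2) := by
  unfold PySem.List.max?
  congr 1
  funext acc x
  cases acc <;> rfl

def pvEnc (o : Option (Char × Int)) : Option Char × Int :=
  match o with
  | none => (none, 0)
  | some kc => (some kc.1, kc.2)

theorem pvBestFold (ps : List (Char × Int)) (hpos : ∀ p ∈ ps, 0 < p.2) (acc : Option (Char × Int)) :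
    ps.foldl (fun bc p => if bc.2 < p.2 then (some p.1, p.2) else bc) (pvEnc acc) =
      pvEnc (ps.foldl pvMStep acc) := by
  induction ps generalizing acc with
  | nil => rfl
  | cons p ps ih =>
    simp only [List.foldl_cons]
    cases acc with
    | none =>
      have hp : (0 : Int) < p.2 := hpos p (by simp)
      simp only [pvEnc, pvMStep, if_pos hp]
      exact ih (fun q hq => hpos q (by simp [hq])) (some p)
    | some kc =>
      simp only [pvEnc, pvMStep]
      by_cases hlt : kc.2 < p.2
      · simp only [if_pos hlt]
        exact ih (fun q hq => hpos q (by simp [hq])) (some p)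
      · simp only [if_neg hlt]
        exact ih (fun q hq => hpos q (by simp [hq])) (some kc)

theorem pvBestB_eq_bestSpec (cw : List String) (j : Nat) :
    pvBestB cw (j : Int) = pvBestSpec cw j := by
  unfold pvBestB pvBestSpec
  rw [pvCountsB_eq_counter, PySem.Dict.items_counter]
  have hpos : ∀ p ∈ (PySem.Set.ofList (pvLetters cw j)).map
      (fun k => (k, ((pvLetters cw j).count k : Int))), 0 < p.2 := by
    intro p hp
    obtain ⟨k, hk, rfl⟩ := List.mem_map.mp hp
    have hmem : k ∈ pvLetters cw j := (PySem.Set.mem_ofList _ _).mp hk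
    have hcnt : 0 < (pvLetters cw j).count k := List.count_pos_iff.mpr hmem
    show (0 : Int) < (((pvLetters cw j).count k : Nat) : Int)
    exact_mod_cast hcnt
  rw [show ((none : Option Char), (0 : Int)) = pvEnc none from rfl, pvBestFold _ hpos none]
  rw [pvFoldl_mstep, pvMax?_map]
  cases PySem.List.max? (PySem.Set.ofList (pvLetters cw j))
      (fun k => (((pvLetters cw j).count k : Nat) : Int)) with
  | none => rfl
  | some k => rfl

theorem pvScore_eq_countP (most : List (Option Char)) (w : String) :
    pvScore most w = (((PySem.List.enumerate w.toList).countP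
      (fun p => PySem.List.pyGetD most p.1 none == some p.2) : Nat) : Int) := by
  unfold pvScore
  rw [← PySem.List.sum_map_ite_one_zero]
  congr 1
  apply List.map_congr_left
  intro p _
  by_cases h : PySem.List.pyGetD most p.1 none = some p.2 <;> simp [h]

theorem pvScoreNat_le_len (most : List (Option Char)) (w : String) :
    (PySem.List.enumerate w.toList).countP
      (fun p => PySem.List.pyGetD most p.1 none == some p.2) ≤ w.toList.length := by
  calc (PySem.List.enumerate w.toList).countP _ ≤ (PySem.List.enumerate w.toList).length :=
        List.countP_le_length
    _ = w.toList.length := PySem.List.length_enumerate _ _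

theorem pvInsertBy_front {α : Type} (before : α → α → Bool) (x : α) (l : List α)
    (h : ∀ y ∈ l, before x y = true) :
    PySem.List.insertBy before x l = x :: l := by
  cases l with
  | nil => rfl
  | cons y ys => simp [PySem.List.insertBy, h y (by simp)]

theorem pvInsertBy_append {α : Type} (before : α → α → Bool) (x : α) (l1 l2 : List α)
    (h : ∀ y ∈ l1, before x y = false) :
    PySem.List.insertBy before x (l1 ++ l2) = l1 ++ PySem.List.insertBy before x l2 := by
  induction l1 with
  | nil => rfl
  | cons y ys ih =>
    simp only [List.cons_append, PySem.List.insertBy, h y (by simp)]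
    simp only [Bool.false_eq_true, if_false]
    rw [ih (fun z hz => h z (by simp [hz]))]

theorem pvInsertBy_groups {α : Type} (key : α → Int) (ds : List Int)
    (hds : ds.Pairwise (fun a b => b < a)) (p : List α) (x : α) (hx : key x ∈ ds) :
    PySem.List.insertBy (fun a b => decide (key b < key a)) x
        (ds.flatMap (fun s => p.filter (fun y => key y = s))) =
      ds.flatMap (fun s => (p ++ [x]).filter (fun y => key y = s)) := by
  induction ds with
  | nil => cases hx
  | cons s ds ih =>
    obtain ⟨hlt, hds'⟩ := List.pairwise_cons.mp hds
    simp only [List.flatMap_cons]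
    by_cases hxs : key x = s
    · have hpass : ∀ y ∈ p.filter (fun y => decide (key y = s)),
          (fun a b => decide (key b < key a)) x y = false := by
        intro y hy
        have : key y = s := by simpa using (List.mem_filter.mp hy).2
        simp [this, hxs]
      rw [pvInsertBy_append _ _ _ _ hpass]
      have hfront : ∀ y ∈ ds.flatMap (fun s => p.filter (fun y => decide (key y = s))),
          (fun a b => decide (key b < key a)) x y = true := by
        intro y hy
        obtain ⟨s', hs', hy'⟩ := List.mem_flatMap.mp hy
        have h1 : key y = s' := by simpa using (List.mem_filter.mp hy').2
        have h2 : s' < s := hlt s' hs'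
        simp [h1, hxs]; omega
      rw [pvInsertBy_front _ _ _ hfront]
      have hblock : (p ++ [x]).filter (fun y => decide (key y = s)) =
          p.filter (fun y => decide (key y = s)) ++ [x] := by
        rw [List.filter_append]
        simp [hxs]
      have hrest : ds.flatMap (fun s => (p ++ [x]).filter (fun y => decide (key y = s))) =
          ds.flatMap (fun s => p.filter (fun y => decide (key y = s))) := by
        apply List.flatMap_congr  -- congruence over members
        intro s' hs'
        rw [List.filter_append]
        have : key x ≠ s' := by have := hlt s' hs'; omega
        simp [this]
      rw [hblock, hrest]
      simp
    · have hx' : key x ∈ ds := by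
        rcases List.mem_cons.mp hx with h | h
        · exact absurd h hxs
        · exact h
      have hpass : ∀ y ∈ p.filter (fun y => decide (key y = s)),
          (fun a b => decide (key b < key a)) x y = false := by
        intro y hy
        have h1 : key y = s := by simpa using (List.mem_filter.mp hy).2
        have h2 : key x < s := lt_of_le_of_lt (le_of_eq rfl) (by
          have := hlt _ hx'; omega)
        simp [h1]; omega
      rw [pvInsertBy_append _ _ _ _ hpass, ih hds' hx']
      have hblock : (p ++ [x]).filter (fun y => decide (key y = s)) =
          p.filter (fun y => decide (key y = s)) := by
        rw [List.filter_append]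
        simp [hxs]
      rw [hblock]

theorem pvSortedRevGroups {α : Type} (key : α → Int) (ds : List Int)
    (hds : ds.Pairwise (fun a b => b < a)) (xs : List α) (hx : ∀ x ∈ xs, key x ∈ ds) :
    PySem.List.sorted xs key true = ds.flatMap (fun s => xs.filter (fun y => key y = s)) := by
  rw [PySem.List.sorted_rev_eq_foldl_insertBy]
  induction xs using List.reverseRecOn with
  | nil => simp
  | append_singleton p x ih =>
    rw [List.foldl_append]
    simp only [List.foldl_cons, List.foldl_nil]
    rw [ih (fun y hy => hx y (by simp [hy]))]
    exact pvInsertBy_groups key ds hds p x (hx x (by simp))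

theorem pvBuckets_getElem {γ : Type} (idx : γ → Nat) (cw : List γ) (b0 : List (List γ)) (s : Nat) :
    (cw.foldl (fun b w => b.modify (idx w) (fun bl => bl ++ [w])) b0)[s]? =
      b0[s]?.map (fun bl => bl ++ cw.filter (fun w => idx w == s)) := by
  induction cw generalizing b0 with
  | nil => simp
  | cons w cw ih =>
    simp only [List.foldl_cons]
    rw [ih, List.getElem?_modify]
    cases hb : b0[s]? with
    | none => simp
    | some bl =>
      by_cases hws : idx w = s
      · simp [hws]
      · simp [hws]

theorem pvPyRange_down (m : Nat) :
    PySem.List.pyRange (m : Int) (-1) (-1) =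
      (List.range (m + 1)).map (fun k : Nat => (m : Int) - (k : Int)) := by
  unfold PySem.List.pyRange
  norm_num
  simp [show (-1 : Int) < (m : Int) by omega, sub_eq_add_neg]

-- canonical forms shared by both sides (n = word_length.toNat)
def pvMostN (cw : List String) (n : Nat) : List (Option Char) :=
  (List.range n).map (fun j => pvBestSpec cw j)

def pvSN (cw : List String) (n : Nat) (w : String) : Nat :=
  (PySem.List.enumerate w.toList).countP
    (fun p => PySem.List.pyGetD (pvMostN cw n) p.1 none == some p.2)

def pvCanon (cw : List String) (n : Nat) : List String :=
  List.take 3 ((List.range (n + 1)).flatMap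
    (fun k => cw.filter (fun w => pvSN cw n w == n - k)))

theorem pvPyRangeZero (wl : Int) :
    PySem.List.pyRange 0 wl 1 = (List.range wl.toNat).map (fun k : Nat => (k : Int)) := by
  by_cases hwl : 0 ≤ wl
  · obtain ⟨n, rfl⟩ : ∃ n : Nat, wl = (n : Int) := ⟨wl.toNat, by omega⟩
    rw [Int.toNat_natCast]
    exact PySem.List.pyRange_zero_natCast n
  · have h0 : wl.toNat = 0 := by omega
    rw [h0]
    unfold PySem.List.pyRange
    norm_num
    omega

theorem pvMostB_eq (cw : List String) (wl : Int) : pvMostB cw wl = pvMostN cw wl.toNat := by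
  unfold pvMostB pvMostN
  rw [pvPyRangeZero, PySem.List.foldl_append_singleton_eq_map]
  simp only [List.nil_append, List.map_map]
  exact List.map_congr_left (fun j _ => pvBestB_eq_bestSpec cw j)

def pvMaxNat (cw : List String) : Nat := cw.foldl (fun m w => max m w.toList.length) 0

theorem pvMaxlenB_aux (cw : List String) (m : Nat) :
    cw.foldl (fun m w => if m < PySem.Str.len w then PySem.Str.len w else m) (m : Int) =
      ((cw.foldl (fun m w => max m w.toList.length) m : Nat) : Int) := by
  induction cw generalizing m with
  | nil => rfl
  | cons w cw ih =>
    simp only [List.foldl_cons, PySem.Str.len]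
    rw [show (if (m : Int) < (w.toList.length : Int) then (w.toList.length : Int) else (m : Int)) =
        ((max m w.toList.length : Nat) : Int) by split_ifs <;> push_cast <;> omega]
    exact ih (max m w.toList.length)

theorem pvMaxlenB_eq (cw : List String) : pvMaxlenB cw = (pvMaxNat cw : Int) := by
  unfold pvMaxlenB pvMaxNat
  exact pvMaxlenB_aux cw 0

theorem pvMaxNat_init_le (cw : List String) (m : Nat) :
    m ≤ cw.foldl (fun m w => max m w.toList.length) m := by
  induction cw generalizing m with
  | nil => simp
  | cons w cw ih =>
    simp only [List.foldl_cons]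
    exact le_trans (le_max_left _ _) (ih (max m w.toList.length))

theorem pvLen_le_maxNat (cw : List String) (w : String) (h : w ∈ cw) :
    w.toList.length ≤ pvMaxNat cw := by
  unfold pvMaxNat
  generalize (0 : Nat) = m
  induction cw generalizing m with
  | nil => cases h
  | cons v cw ih =>
    simp only [List.foldl_cons]
    rcases List.mem_cons.mp h with rfl | hmem
    · exact le_trans (le_max_right _ _) (pvMaxNat_init_le cw _)
    · exact ih hmem _

-- the score of a word does not depend on the width of the most list beyond the word itself
theorem pvScore_width (cw : List String) (n1 n2 : Nat) (w : String)
    (h1 : w.toList.length ≤ n1) (h2 : w.toList.length ≤ n2) :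
    pvScore (pvMostN cw n1) w = pvScore (pvMostN cw n2) w := by
  unfold pvScore
  congr 1
  apply List.map_congr_left
  intro p hp
  obtain ⟨k, hk, rfl⟩ := (PySem.List.mem_enumerate_iff _ _ _).mp hp
  congr 1
  simp only [zero_add, PySem.List.pyGetD_natCast]
  unfold pvMostN
  rw [List.getD_eq_getElem?_getD, List.getElem?_map,
    List.getD_eq_getElem?_getD, List.getElem?_map]
  simp [show k < n1 by omega, show k < n2 by omega]

theorem pvScore_congr (cw : List String) (n : Nat) (w : String)
    (hn : w.toList.length ≤ n) :
    pvScore ((cw.foldl pvProcessWordA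
        ((PySem.List.pyRange 0 (n : Int) 1).map (fun _ => PySem.Dict.empty))).map pvEntryA) w =
      pvScore (pvMostN cw n) w := by
  unfold pvScore
  congr 1
  apply List.map_congr_left
  intro p hp
  obtain ⟨k, hk, rfl⟩ := (PySem.List.mem_enumerate_iff _ _ _).mp hp
  have hkn : k < n := by omega
  congr 1
  simp only [zero_add, PySem.List.pyGetD_natCast]
  have hA : ((cw.foldl pvProcessWordA
      ((PySem.List.pyRange 0 (n : Int) 1).map (fun _ => PySem.Dict.empty))).map pvEntryA).getD k none =
      pvBestSpec cw k := by
    have hpf0 : ((PySem.List.pyRange 0 (n : Int) 1).map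
        (fun _ => (PySem.Dict.empty : PySem.Dict Char Int)))[k]? = some PySem.Dict.empty := by
      rw [PySem.List.pyRange_zero_natCast]
      simp [hkn]
    rw [List.getD_eq_getElem?_getD, List.getElem?_map, pvPosFreq_getElem, hpf0]
    simp only [Option.map_some, Option.getD_some]
    rw [show (pvLetters cw k).foldl pvCStep PySem.Dict.empty = PySem.Dict.counter (pvLetters cw k)
        from PySem.Dict.foldl_insert_getD_add_one_eq_counter _]
    exact pvEntryA_counter _
  have hB : (pvMostN cw n).getD k none = pvBestSpec cw k := by
    unfold pvMostN
    rw [List.getD_eq_getElem?_getD, List.getElem?_map]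
    simp [hkn]
  rw [hA, hB]

theorem pvB_eq (cw : List String) (n : Nat) (hpre : Pre_suggest_words cw (n : Int)) :
    suggest_words_alt cw (n : Int) = pvCanon cw n := by
  unfold suggest_words_alt pvCanon
  simp only [pvMaxlenB_eq]
  rw [show min ((n : Nat) : Int) ((pvMaxNat cw : Nat) : Int) = ((min n (pvMaxNat cw) : Nat) : Int)
      by push_cast; rfl]
  simp only [pvMostB_eq, Int.toNat_natCast]
  rw [pvPyRange_down, PySem.List.slice_to _ (by norm_num : (0:Int) ≤ 3)]
  norm_num
  congr 1
  rw [← List.flatMap_def]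
  apply List.flatMap_congr
  intro k hk
  have hkM : k ≤ n := by
    have := List.mem_range.mp hk; omega
  simp only [Function.comp_apply]
  rw [show ((n : Int) - (k : Int)) = ((n - k : Nat) : Int) by omega,
    PySem.List.pyGetD_natCast, List.getD_eq_getElem?_getD,
    pvBuckets_getElem (fun w => (pvScore (pvMostN cw (min n (pvMaxNat cw))) w).toNat)]
  have hb0 : (List.replicate (n + 1) ([] : List String))[n - k]? = some [] := by
    simp [show n - k < n + 1 by omega]
  rw [hb0]
  simp only [Option.map_some, Option.getD_some, List.nil_append]
  apply List.filter_congr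
  intro w hw
  have hlen : w.toList.length ≤ n := by
    have := hpre w hw
    simp only [PySem.Str.len] at this
    omega
  have hlenM : w.toList.length ≤ pvMaxNat cw := pvLen_le_maxNat cw w hw
  rw [pvScore_width cw (min n (pvMaxNat cw)) n w (by omega) hlen,
    pvScore_eq_countP, Int.toNat_natCast]
  rfl

theorem pvA_eq (cw : List String) (n : Nat) (hpre : Pre_suggest_words cw (n : Int)) :
    suggest_words cw (n : Int) = pvCanon cw n := by
  unfold suggest_words pvCanon
  simp only []
  have hlen : ∀ w ∈ cw, w.toList.length ≤ n := by
    intro w hw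
    have := hpre w hw
    simp only [PySem.Str.len] at this
    omega
  have hsw : cw.map (fun w =>
      (pvScore ((cw.foldl pvProcessWordA
        ((PySem.List.pyRange 0 (n : Int) 1).map (fun _ => PySem.Dict.empty))).map pvEntryA) w, w)) =
      cw.map (fun w => (((pvSN cw n w : Nat) : Int), w)) := by
    apply List.map_congr_left
    intro w hw
    rw [pvScore_congr cw n w (hlen w hw), pvScore_eq_countP]
    rfl
  rw [hsw]
  have hds : ((List.range (n + 1)).map
      (fun k : Nat => (n : Int) - (k : Int))).Pairwise (fun a b => b < a) := by
    rw [List.pairwise_map]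
    apply List.Pairwise.imp ?_ (List.pairwise_lt_range)
    intro a b hab
    omega
  have hmem : ∀ x ∈ cw.map (fun w => (((pvSN cw n w : Nat) : Int), w)),
      x.1 ∈ (List.range (n + 1)).map
        (fun k : Nat => (n : Int) - (k : Int)) := by
    intro x hx
    obtain ⟨w, hw, rfl⟩ := List.mem_map.mp hx
    have h1 : pvSN cw n w ≤ w.toList.length := pvScoreNat_le_len _ _
    have h2 : w.toList.length ≤ n := hlen w hw
    refine List.mem_map.mpr ⟨n - pvSN cw n w, List.mem_range.mpr (by omega), ?_⟩
    push_cast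
    omega
  rw [pvSortedRevGroups (fun x : Int × String => x.1) _ hds _ hmem,
    PySem.List.slice_to _ (by norm_num : (0:Int) ≤ 3), List.map_take]
  congr 1
  rw [List.map_flatMap, List.flatMap_map]
  apply List.flatMap_congr
  intro k hk
  have hkM : k ≤ n := by
    have := List.mem_range.mp hk; omega
  rw [List.filter_map, List.map_map]
  simp only [Function.comp_def]
  rw [List.map_id']
  apply List.filter_congr
  intro w _
  have hiff : (((pvSN cw n w : Nat) : Int) = (n : Int) - (k : Int)) ↔
      (pvSN cw n w = n - k) := by omega
  rw [decide_eq_decide.mpr hiff]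
  exact Eq.symm (Bool.beq_eq_decide_eq _ _)

-- the degenerate negative word_length case: Pre_ forces an empty word list, both sides return []
theorem pvGetD_map_nil {α : Type} (l : List α) (s : Int) :
    PySem.List.pyGetD (l.map (fun _ => ([] : List String))) s [] = [] := by
  simp only [PySem.List.pyGetD]
  cases h : PySem.List.pyGet? (l.map (fun _ => ([] : List String))) s with
  | none => rfl
  | some v =>
    have hv := PySem.List.mem_of_pyGet?_eq_some _ h
    simp only [List.mem_map] at hv
    obtain ⟨_, _, rfl⟩ := hv
    rfl

theorem pvA_neg (wl : Int) : suggest_words [] wl = [] := by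
  unfold suggest_words
  simp [PySem.List.sorted, PySem.List.slice]

theorem pvB_neg (wl : Int) : suggest_words_alt [] wl = [] := by
  unfold suggest_words_alt
  simp only [List.foldl_nil, PySem.List.foldl_append_eq_flatMap, List.nil_append]
  rw [List.flatMap_eq_nil_iff.mpr (fun s _ => pvGetD_map_nil _ s)]
  simp [PySem.List.slice]

-- ===== VERDICT (by name: the statement is the Claim_ definition above) =====
theorem suggest_words_spec : Claim_equal_suggest_words := by
  intro cw wl hdom hpre
  unfold Spec_suggest_words
  by_cases hwl : 0 ≤ wl
  · obtain ⟨n, rfl⟩ : ∃ n : Nat, wl = (n : Int) := ⟨wl.toNat, by omega⟩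
    rw [pvA_eq cw n hpre, pvB_eq cw n hpre]
  · have hcw : cw = [] := by
      cases hc : cw with
      | nil => rfl
      | cons w t =>
        exfalso
        have := hpre w (by rw [hc]; exact List.mem_cons_self ..)
        simp only [PySem.Str.len] at this
        omega
    subst hcw
    rw [pvA_neg wl, pvB_neg wl]
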